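-- pv_equiv track=rewrite | github.com/SaxxonPike/iidx-ps2tools | animtool/ps2textures.py | readTexPSMT8
-- ===== SOURCE A (Python) =====
-- block8 = [
--      0,  1,  4,  5, 16, 17, 20, 21,
--      2,  3,  6,  7, 18, 19, 22, 23,
--      8,  9, 12, 13, 24, 25, 28, 29,
--     10, 11, 14, 15, 26, 27, 30, 31
-- ]
--
-- columnWord8 = [
--     [
--          0,  1,  4,  5,  8,  9, 12, 13,   0,  1,  4,  5,  8,  9, 12, 13,
--          2,  3,  6,  7, 10, 11, 14, 15,   2,  3,  6,  7, 10, 11, 14, 15,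
--
--          8,  9, 12, 13,  0,  1,  4,  5,   8,  9, 12, 13,  0,  1,  4,  5,
--         10, 11, 14, 15,  2,  3,  6,  7,  10, 11, 14, 15,  2,  3,  6,  7
--     ],
--     [
--          8,  9, 12, 13,  0,  1,  4,  5,   8,  9, 12, 13,  0,  1,  4,  5,
--         10, 11, 14, 15,  2,  3,  6,  7,  10, 11, 14, 15,  2,  3,  6,  7,
--
--          0,  1,  4,  5,  8,  9, 12, 13,   0,  1,  4,  5,  8,  9, 12, 13,
--          2,  3,  6,  7, 10, 11, 14, 15,   2,  3,  6,  7, 10, 11, 14, 15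
--     ]
-- ]
--
-- columnByte8 = [
--     0, 0, 0, 0, 0, 0, 0, 0,  2, 2, 2, 2, 2, 2, 2, 2,
--     0, 0, 0, 0, 0, 0, 0, 0,  2, 2, 2, 2, 2, 2, 2, 2,
--
--     1, 1, 1, 1, 1, 1, 1, 1,  3, 3, 3, 3, 3, 3, 3, 3,
--     1, 1, 1, 1, 1, 1, 1, 1,  3, 3, 3, 3, 3, 3, 3, 3
-- ]
--
-- def readTexPSMT8(dbp, dbw, dsax, dsay, rrw, rrh, data, gsmem):
--     data_idx = 0
--     startBlockPos = dbp * 64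
--
--     dbw >>= 1
--
--     for y in range(dsay, dsay + rrh):
--         for x in range(dsax, dsax + rrw):
--             pageX = x // 128
--             pageY = y // 64
--             page  = pageX + pageY * dbw
--
--             px = x - (pageX * 128)
--             py = y - (pageY * 64)
--
--             blockX = px // 16
--             blockY = py // 16
--             block  = block8[blockX + blockY * 8]
--
--             bx = px - blockX * 16
--             by = py - blockY * 16
--
--             column = by // 4
--
--             cx = bx
--             cy = by - column * 4
--             cw = columnWord8[column & 1][cx + cy * 16]
--             cb = columnByte8[cx + cy * 16]
--
--             data[data_idx] = gsmem[(startBlockPos + page * 2048 + block * 64 + column * 16 + cw) * 4 + cb]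
--             data_idx += 1
--
--     return data
-- ===== SOURCE B (Python) =====
-- block8 = [
--      0,  1,  4,  5, 16, 17, 20, 21,
--      2,  3,  6,  7, 18, 19, 22, 23,
--      8,  9, 12, 13, 24, 25, 28, 29,
--     10, 11, 14, 15, 26, 27, 30, 31
-- ]
--
-- columnWord8 = [
--     [
--          0,  1,  4,  5,  8,  9, 12, 13,   0,  1,  4,  5,  8,  9, 12, 13,
--          2,  3,  6,  7, 10, 11, 14, 15,   2,  3,  6,  7, 10, 11, 14, 15,
--          8,  9, 12, 13,  0,  1,  4,  5,   8,  9, 12, 13,  0,  1,  4,  5,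
--         10, 11, 14, 15,  2,  3,  6,  7,  10, 11, 14, 15,  2,  3,  6,  7
--     ],
--     [
--          8,  9, 12, 13,  0,  1,  4,  5,   8,  9, 12, 13,  0,  1,  4,  5,
--         10, 11, 14, 15,  2,  3,  6,  7,  10, 11, 14, 15,  2,  3,  6,  7,
--          0,  1,  4,  5,  8,  9, 12, 13,   0,  1,  4,  5,  8,  9, 12, 13,
--          2,  3,  6,  7, 10, 11, 14, 15,   2,  3,  6,  7, 10, 11, 14, 15
--     ]
-- ]
--
-- columnByte8 = [
--     0, 0, 0, 0, 0, 0, 0, 0,  2, 2, 2, 2, 2, 2, 2, 2,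
--     0, 0, 0, 0, 0, 0, 0, 0,  2, 2, 2, 2, 2, 2, 2, 2,
--     1, 1, 1, 1, 1, 1, 1, 1,  3, 3, 3, 3, 3, 3, 3, 3,
--     1, 1, 1, 1, 1, 1, 1, 1,  3, 3, 3, 3, 3, 3, 3, 3
-- ]
--
--
-- def _entry(px, py):
--     # intra-page byte offset of pixel (px, py), 0 <= px < 128, 0 <= py < 64
--     blockX = px // 16
--     blockY = py // 16
--     block = block8[blockX + blockY * 8]
--     bx = px - blockX * 16
--     by = py - blockY * 16
--     column = by // 4
--     cx = bx
--     cy = by - column * 4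
--     cw = columnWord8[column & 1][cx + cy * 16]
--     cb = columnByte8[cx + cy * 16]
--     return (block * 64 + column * 16 + cw) * 4 + cb
--
--
-- # 64x128 intra-page offset table, built once
-- _TABLE = [[_entry(px, py) for px in range(128)] for py in range(64)]
--
--
-- def readTexPSMT8(dbp, dbw, dsax, dsay, rrw, rrh, data, gsmem):
--     # does not mutate data: the deswizzled pixels are built as a fresh list
--     base = dbp * 64
--     w = dbw >> 1
--     out = [gsmem[(base + (x // 128 + (y // 64) * w) * 2048) * 4 + _TABLE[y % 64][x % 128]]
--            for y in range(dsay, dsay + rrh)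
--            for x in range(dsax, dsax + rrw)]
--     return out + data[len(out):]
-- ===== Notes on version B (the rewrite author's own statement) =====
-- stated objective: alternative
-- what changed: B precomputes a 64x128 intra-page offset table once and builds the output as a fresh comprehension (plus the untouched tail of data) instead of recomputing the full per-pixel swizzle arithmetic and assigning into data in place; return-value equivalent, but B does not mutate data.
import Mathlib
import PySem

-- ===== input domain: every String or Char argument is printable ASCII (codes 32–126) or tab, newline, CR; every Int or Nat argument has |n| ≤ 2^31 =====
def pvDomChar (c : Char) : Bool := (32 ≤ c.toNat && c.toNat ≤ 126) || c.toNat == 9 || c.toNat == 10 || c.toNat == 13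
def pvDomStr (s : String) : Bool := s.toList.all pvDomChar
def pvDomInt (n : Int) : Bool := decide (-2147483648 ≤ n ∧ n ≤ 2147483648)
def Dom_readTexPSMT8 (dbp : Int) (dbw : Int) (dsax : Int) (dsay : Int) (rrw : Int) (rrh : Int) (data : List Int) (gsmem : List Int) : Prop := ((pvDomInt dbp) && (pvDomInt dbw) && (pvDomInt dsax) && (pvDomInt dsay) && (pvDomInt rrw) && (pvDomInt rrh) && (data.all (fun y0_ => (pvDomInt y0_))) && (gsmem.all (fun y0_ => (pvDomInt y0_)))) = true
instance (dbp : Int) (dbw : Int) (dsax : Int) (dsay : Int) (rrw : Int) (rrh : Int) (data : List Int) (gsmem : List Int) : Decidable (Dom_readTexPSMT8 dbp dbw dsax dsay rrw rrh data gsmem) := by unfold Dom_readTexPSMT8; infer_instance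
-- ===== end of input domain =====

-- B deswizzles through a precomputed 64x128 intra-page offset table and builds a fresh
-- output list instead of A's per-pixel swizzle arithmetic with in-place writes into data;
-- the equivalence is about the RETURN value only (A mutates data, B does not).

-- ===== PORT A =====
-- module constants of Source A
def pvBlock8 : List Int := [
  0, 1, 4, 5, 16, 17, 20, 21,
  2, 3, 6, 7, 18, 19, 22, 23,
  8, 9, 12, 13, 24, 25, 28, 29,
  10, 11, 14, 15, 26, 27, 30, 31]

def pvColumnWord8 : List (List Int) := [
  [0, 1, 4, 5, 8, 9, 12, 13, 0, 1, 4, 5, 8, 9, 12, 13,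
   2, 3, 6, 7, 10, 11, 14, 15, 2, 3, 6, 7, 10, 11, 14, 15,
   8, 9, 12, 13, 0, 1, 4, 5, 8, 9, 12, 13, 0, 1, 4, 5,
   10, 11, 14, 15, 2, 3, 6, 7, 10, 11, 14, 15, 2, 3, 6, 7],
  [8, 9, 12, 13, 0, 1, 4, 5, 8, 9, 12, 13, 0, 1, 4, 5,
   10, 11, 14, 15, 2, 3, 6, 7, 10, 11, 14, 15, 2, 3, 6, 7,
   0, 1, 4, 5, 8, 9, 12, 13, 0, 1, 4, 5, 8, 9, 12, 13,
   2, 3, 6, 7, 10, 11, 14, 15, 2, 3, 6, 7, 10, 11, 14, 15]]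

def pvColumnByte8 : List Int := [
  0, 0, 0, 0, 0, 0, 0, 0, 2, 2, 2, 2, 2, 2, 2, 2,
  0, 0, 0, 0, 0, 0, 0, 0, 2, 2, 2, 2, 2, 2, 2, 2,
  1, 1, 1, 1, 1, 1, 1, 1, 3, 3, 3, 3, 3, 3, 3, 3,
  1, 1, 1, 1, 1, 1, 1, 1, 3, 3, 3, 3, 3, 3, 3, 3]

-- literal transliteration of A ('dbw >>= 1' is 'dbw >>> 1'; data[i]=v is pySetD, in range under Pre_)
def readTexPSMT8 (dbp : Int) (dbw : Int) (dsax : Int) (dsay : Int) (rrw : Int) (rrh : Int) (data : List Int) (gsmem : List Int) : List Int :=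
  let startBlockPos := dbp * 64
  let dbw1 := dbw >>> 1
  let st := (PySem.List.pyRange dsay (dsay + rrh) 1).foldl (fun (st : List Int × Int) y =>
    (PySem.List.pyRange dsax (dsax + rrw) 1).foldl (fun (st : List Int × Int) x =>
      let pageX := PySem.Int.floordiv x 128
      let pageY := PySem.Int.floordiv y 64
      let page := pageX + pageY * dbw1
      let px := x - pageX * 128
      let py := y - pageY * 64
      let blockX := PySem.Int.floordiv px 16
      let blockY := PySem.Int.floordiv py 16
      let block := PySem.List.pyGetD pvBlock8 (blockX + blockY * 8) 0
      let bx := px - blockX * 16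
      let byv := py - blockY * 16
      let column := PySem.Int.floordiv byv 4
      let cx := bx
      let cy := byv - column * 4
      let cw := PySem.List.pyGetD (PySem.List.pyGetD pvColumnWord8 (PySem.Int.band column 1) []) (cx + cy * 16) 0
      let cb := PySem.List.pyGetD pvColumnByte8 (cx + cy * 16) 0
      (PySem.List.pySetD st.1 st.2
        (PySem.List.pyGetD gsmem ((startBlockPos + page * 2048 + block * 64 + column * 16 + cw) * 4 + cb) 0),
       st.2 + 1)) st) (data, (0 : Int))
  st.1

-- ===== PORT B =====
-- Source B's _entry helper
def pvEntry8 (px : Int) (py : Int) : Int :=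
  let blockX := PySem.Int.floordiv px 16
  let blockY := PySem.Int.floordiv py 16
  let block := PySem.List.pyGetD pvBlock8 (blockX + blockY * 8) 0
  let bx := px - blockX * 16
  let byv := py - blockY * 16
  let column := PySem.Int.floordiv byv 4
  let cx := bx
  let cy := byv - column * 4
  let cw := PySem.List.pyGetD (PySem.List.pyGetD pvColumnWord8 (PySem.Int.band column 1) []) (cx + cy * 16) 0
  let cb := PySem.List.pyGetD pvColumnByte8 (cx + cy * 16) 0
  (block * 64 + column * 16 + cw) * 4 + cb

-- Source B's _TABLE
def pvTable8 : List (List Int) :=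
  (PySem.List.pyRange 0 64 1).map (fun py => (PySem.List.pyRange 0 128 1).map (fun px => pvEntry8 px py))

def readTexPSMT8_alt (dbp : Int) (dbw : Int) (dsax : Int) (dsay : Int) (rrw : Int) (rrh : Int) (data : List Int) (gsmem : List Int) : List Int :=
  let base := dbp * 64
  let w := dbw >>> 1
  let out := (PySem.List.pyRange dsay (dsay + rrh) 1).flatMap (fun y =>
    (PySem.List.pyRange dsax (dsax + rrw) 1).map (fun x =>
      PySem.List.pyGetD gsmem
        ((base + (PySem.Int.floordiv x 128 + PySem.Int.floordiv y 64 * w) * 2048) * 4 +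
          PySem.List.pyGetD (PySem.List.pyGetD pvTable8 (PySem.Int.mod y 64) []) (PySem.Int.mod x 128) 0) 0))
  out ++ PySem.List.slice data (some (PySem.List.len out)) none

-- ===== PRECONDITION & SPEC =====
-- the gsmem address A reads for output pixel (x, y)
def pvAddr8 (dbp : Int) (dbw : Int) (x : Int) (y : Int) : Int :=
  (dbp * 64 + (PySem.Int.floordiv x 128 + PySem.Int.floordiv y 64 * (dbw >>> 1)) * 2048) * 4 +
    pvEntry8 (PySem.Int.mod x 128) (PySem.Int.mod y 64)

-- exactly the inputs on which A returns: data holds all rrw*rrh written slots and every gsmem read is a valid Python index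
def Pre_readTexPSMT8 (dbp : Int) (dbw : Int) (dsax : Int) (dsay : Int) (rrw : Int) (rrh : Int) (data : List Int) (gsmem : List Int) : Prop :=
  max rrw 0 * max rrh 0 ≤ (data.length : Int) ∧
  ∀ y ∈ PySem.List.pyRange dsay (dsay + rrh) 1, ∀ x ∈ PySem.List.pyRange dsax (dsax + rrw) 1,
    PySem.Raise.InRange gsmem.length (pvAddr8 dbp dbw x y)

instance (dbp : Int) (dbw : Int) (dsax : Int) (dsay : Int) (rrw : Int) (rrh : Int) (data : List Int) (gsmem : List Int) : Decidable (Pre_readTexPSMT8 dbp dbw dsax dsay rrw rrh data gsmem) := by unfold Pre_readTexPSMT8; infer_instance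

def pvWitness_readTexPSMT8 : Int × Int × Int × Int × Int × Int × List Int × List Int := (0, 2, 0, 0, 1, 1, [0], [7])

def Spec_readTexPSMT8 (dbp : Int) (dbw : Int) (dsax : Int) (dsay : Int) (rrw : Int) (rrh : Int) (data : List Int) (gsmem : List Int) (out : List Int) : Prop := out = readTexPSMT8_alt dbp dbw dsax dsay rrw rrh data gsmem
instance (dbp : Int) (dbw : Int) (dsax : Int) (dsay : Int) (rrw : Int) (rrh : Int) (data : List Int) (gsmem : List Int) (out : List Int) : Decidable (Spec_readTexPSMT8 dbp dbw dsax dsay rrw rrh data gsmem out) := by unfold Spec_readTexPSMT8; infer_instance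

-- ===== CLAIM (what is proved, stated in full; the proofs are below) =====
def Claim_equal_readTexPSMT8 : Prop := ∀ (dbp : Int) (dbw : Int) (dsax : Int) (dsay : Int) (rrw : Int) (rrh : Int) (data : List Int) (gsmem : List Int), Dom_readTexPSMT8 dbp dbw dsax dsay rrw rrh data gsmem → Pre_readTexPSMT8 dbp dbw dsax dsay rrw rrh data gsmem → Spec_readTexPSMT8 dbp dbw dsax dsay rrw rrh data gsmem (readTexPSMT8 dbp dbw dsax dsay rrw rrh data gsmem)

-- ===== LEMMAS AND PROOFS =====

-- the per-pixel value both programs read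
def pvVal8 (dbp : Int) (dbw : Int) (gsmem : List Int) (x : Int) (y : Int) : Int :=
  PySem.List.pyGetD gsmem (pvAddr8 dbp dbw x y) 0

theorem pv_px_eq_mod (x : Int) : x - PySem.Int.floordiv x 128 * 128 = PySem.Int.mod x 128 := by
  rw [PySem.Int.floordiv_eq_ediv_of_pos (by omega), PySem.Int.mod_eq_emod_of_pos (by omega)]
  omega

theorem pv_py_eq_mod (y : Int) : y - PySem.Int.floordiv y 64 * 64 = PySem.Int.mod y 64 := by
  rw [PySem.Int.floordiv_eq_ediv_of_pos (by omega), PySem.Int.mod_eq_emod_of_pos (by omega)]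
  omega

-- sequential writes of vs into data starting at slot k produce take/... decomposition
theorem pv_writeSeq (vs : List Int) (data : List Int) (k : Nat) (h : k + vs.length ≤ data.length) :
    vs.foldl (fun (st : List Int × Int) v => (PySem.List.pySetD st.1 st.2 v, st.2 + 1)) (data, (k : Int))
      = (data.take k ++ vs ++ data.drop (k + vs.length), ((k + vs.length : Nat) : Int)) := by
  induction vs generalizing data k with
  | nil => simp
  | cons v vs ih =>
    simp only [List.foldl_cons, PySem.List.pySetD_natCast]
    have hk : k < data.length := by simp at h; omega
    have h1 : ((k : Int) + 1) = ((k + 1 : Nat) : Int) := by push_cast; ring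
    rw [h1, ih (data.set k v) (k + 1) (by simp at h ⊢; omega)]
    have ht : (data.set k v).take (k + 1) = data.take k ++ [v] := by
      rw [List.set_eq_take_append_cons_drop, if_pos hk, List.take_append]
      simp [Nat.min_eq_left (Nat.le_of_lt hk), List.length_take]
    have hd : (data.set k v).drop (k + 1 + vs.length) = data.drop (k + 1 + vs.length) :=
      List.drop_set_of_lt (by omega)
    rw [ht, hd]
    have hn : k + 1 + vs.length = k + (v :: vs).length := by simp; omega
    rw [hn]
    simp [List.append_assoc]

-- B's table lookup is pvEntry8
theorem pv_table_lookup (x y : Int) :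
    PySem.List.pyGetD (PySem.List.pyGetD pvTable8 (PySem.Int.mod y 64) []) (PySem.Int.mod x 128) 0
      = pvEntry8 (PySem.Int.mod x 128) (PySem.Int.mod y 64) := by
  unfold pvTable8
  rw [PySem.List.pyGetD_map_pyRange_of_nonneg _ 64 _ _ (PySem.Int.mod_nonneg _ (by omega)) (PySem.Int.mod_lt _ (by omega)),
      PySem.List.pyGetD_map_pyRange_of_nonneg _ 128 _ _ (PySem.Int.mod_nonneg _ (by omega)) (PySem.Int.mod_lt _ (by omega))]

-- B computes the pixel list followed by the tail of data
theorem pv_alt_eq (dbp dbw dsax dsay rrw rrh : Int) (data gsmem : List Int) :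
    readTexPSMT8_alt dbp dbw dsax dsay rrw rrh data gsmem
      = ((PySem.List.pyRange dsay (dsay + rrh) 1).flatMap (fun y =>
          (PySem.List.pyRange dsax (dsax + rrw) 1).map (fun x => pvVal8 dbp dbw gsmem x y)))
        ++ data.drop (rrh.toNat * rrw.toNat) := by
  simp only [readTexPSMT8_alt, pv_table_lookup, pvVal8, pvAddr8, PySem.List.len_eq,
    PySem.List.slice_from_natCast]
  congr 1
  simp [List.length_flatMap, PySem.List.length_pyRange_one]

-- A computes the same list under Pre_
theorem pv_a_eq (dbp dbw dsax dsay rrw rrh : Int) (data gsmem : List Int)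
    (h : max rrw 0 * max rrh 0 ≤ (data.length : Int)) :
    readTexPSMT8 dbp dbw dsax dsay rrw rrh data gsmem
      = ((PySem.List.pyRange dsay (dsay + rrh) 1).flatMap (fun y =>
          (PySem.List.pyRange dsax (dsax + rrw) 1).map (fun x => pvVal8 dbp dbw gsmem x y)))
        ++ data.drop (rrh.toNat * rrw.toNat) := by
  have hval : ∀ x y : Int, pvVal8 dbp dbw gsmem x y =
      (let pageX := PySem.Int.floordiv x 128
       let pageY := PySem.Int.floordiv y 64
       let page := pageX + pageY * (dbw >>> 1)
       let px := x - pageX * 128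
       let py := y - pageY * 64
       let blockX := PySem.Int.floordiv px 16
       let blockY := PySem.Int.floordiv py 16
       let block := PySem.List.pyGetD pvBlock8 (blockX + blockY * 8) 0
       let bx := px - blockX * 16
       let byv := py - blockY * 16
       let column := PySem.Int.floordiv byv 4
       let cx := bx
       let cy := byv - column * 4
       let cw := PySem.List.pyGetD (PySem.List.pyGetD pvColumnWord8 (PySem.Int.band column 1) []) (cx + cy * 16) 0
       let cb := PySem.List.pyGetD pvColumnByte8 (cx + cy * 16) 0
       PySem.List.pyGetD gsmem ((dbp * 64 + page * 2048 + block * 64 + column * 16 + cw) * 4 + cb) 0) := by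
    intro x y
    simp only [pvVal8, pvAddr8, pvEntry8, ← pv_px_eq_mod, ← pv_py_eq_mod]
    ring_nf
  have hinner : ∀ (st : List Int × Int) (y : Int),
      (PySem.List.pyRange dsax (dsax + rrw) 1).foldl
        (fun (st : List Int × Int) x => (PySem.List.pySetD st.1 st.2 (pvVal8 dbp dbw gsmem x y), st.2 + 1)) st
      = ((PySem.List.pyRange dsax (dsax + rrw) 1).map (fun x => pvVal8 dbp dbw gsmem x y)).foldl
          (fun (st : List Int × Int) v => (PySem.List.pySetD st.1 st.2 v, st.2 + 1)) st := by
    intro st y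
    rw [List.foldl_map]
  have hlen : ((PySem.List.pyRange dsay (dsay + rrh) 1).flatMap (fun y =>
      (PySem.List.pyRange dsax (dsax + rrw) 1).map (fun x => pvVal8 dbp dbw gsmem x y))).length
      ≤ data.length := by
    simp [List.length_flatMap, PySem.List.length_pyRange_one]
    have h2 : ((rrh.toNat * rrw.toNat : Nat) : Int) ≤ (data.length : Int) := by
      calc ((rrh.toNat * rrw.toNat : Nat) : Int) = max rrw 0 * max rrh 0 := by
            push_cast; rw [show ((rrh.toNat : Int)) = max rrh 0 by omega,
              show ((rrw.toNat : Int)) = max rrw 0 by omega]; ring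
        _ ≤ (data.length : Int) := h
    exact_mod_cast h2
  simp only [readTexPSMT8, ← hval, hinner, ← List.foldl_flatMap]
  rw [show ((0 : Int)) = ((0 : Nat) : Int) by simp,
      pv_writeSeq _ data 0 (by simpa using hlen)]
  simp only [List.take_zero, List.nil_append, Nat.zero_add]
  congr 1
  simp [List.length_flatMap, PySem.List.length_pyRange_one]

-- ===== VERDICT (by name: the statement is the Claim_ definition above) =====
theorem readTexPSMT8_spec : Claim_equal_readTexPSMT8 := by
  intro dbp dbw dsax dsay rrw rrh data gsmem _ hpre
  unfold Spec_readTexPSMT8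
  rw [pv_a_eq dbp dbw dsax dsay rrw rrh data gsmem hpre.1, pv_alt_eq]
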